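-- pv_equiv track=rewrite | github.com/BaeInpyo/ProgrammingExercise | Chapter09_DPTechnique/Zimbabwe/sjw_zimbabewe.py | find_prefixes
-- ===== SOURCE A (Python) =====
-- def find_prefixes(number):
--     pool = number[:]
--     result = []
--
--     for idx in range(len(number)):
--         if idx != 0:
--             pool.pop(0)
--
--         for n in range(10):
--             if n < number[idx] and \
--                 n in pool and \
--                     (idx == 0 and n != 0 or idx != 0):
--                 result.append(number[:idx] + [n])
--
--     return result
-- ===== SOURCE B (Python) =====
-- def find_prefixes(number):
--     # Two staged passes instead of A's forward pool-popping scan: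
--     # (1) a backward pass that maintains the sorted distinct digits of the
--     #     current suffix and records, per position, the digits below that
--     #     position's value (a takeWhile over the sorted set - no 0..9 rescan),
--     # (2) a forward pass that attaches the growing prefix to each recorded digit.
--     picks = []
--     digits = []  # sorted distinct digits (0..9) present in the current suffix
--     for d in reversed(number):
--         if 0 <= d < 10 and d not in digits:
--             j = 0
--             while j < len(digits) and digits[j] < d:
--                 j += 1
--             digits.insert(j, d)
--         take = []
--         for n in digits:
--             if n >= d:
--                 break
--             take.append(n)
--         picks.append(take)
--     picks.reverse()
--     # position 0 may not use digit 0; if present it is the head of the sorted picks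
--     if picks and picks[0] and picks[0][0] == 0:
--         picks[0] = picks[0][1:]
--     out = []
--     prefix = []
--     for d, ns in zip(number, picks):
--         for n in ns:
--             out.append(prefix + [n])
--         prefix.append(d)
--     return out
-- ===== Notes on version B (the rewrite author's own statement) =====
-- stated objective: faster
-- what changed: Replaces A's single forward scan (pool popping plus a 0..9 candidate loop with a linear 'n in pool' rescan and number[:idx] slicing) by two staged passes: a backward pass maintaining the sorted distinct suffix digits and recording each position's eligible digits via a takeWhile over that sorted set (no candidate rescans), then a forward pass attaching the incrementally grown prefix; the idx-0 'no leading zero' rule becomes a one-time trim of the first pick list.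
import Mathlib
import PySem

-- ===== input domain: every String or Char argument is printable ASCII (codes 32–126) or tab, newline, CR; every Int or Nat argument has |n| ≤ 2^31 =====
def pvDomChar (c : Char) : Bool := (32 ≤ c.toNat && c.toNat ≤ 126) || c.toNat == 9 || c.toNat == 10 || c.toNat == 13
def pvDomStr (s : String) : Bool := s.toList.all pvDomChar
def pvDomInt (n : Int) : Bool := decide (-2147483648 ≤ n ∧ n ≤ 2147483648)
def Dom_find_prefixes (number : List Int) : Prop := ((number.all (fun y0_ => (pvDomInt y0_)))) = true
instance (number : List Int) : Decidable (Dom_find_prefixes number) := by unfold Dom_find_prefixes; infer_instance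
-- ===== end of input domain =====

-- B replaces A's forward pool-popping scan by a backward pass over a sorted set of suffix digits
-- plus a forward prefix-assembly pass (objective: faster).

-- ===== PORT A =====
-- inner 'for n in range(10)' loop body of A
def pvInnerA (number : List Int) (idx : Int) (pool : List Int) (res : List (List Int)) : List (List Int) :=
  (PySem.List.pyRange 0 10 1).foldl
    (fun res n =>
      if n < PySem.List.pyGetD number idx 0 ∧ n ∈ pool ∧ ((idx = 0 ∧ n ≠ 0) ∨ idx ≠ 0)
      then res ++ [PySem.List.slice number none (some idx) ++ [n]]
      else res) res

-- one iteration of A's outer loop; pool.pop(0) never sees an empty pool for idx in range(len), so the getD fallback is unreachable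
def pvStepA (number : List Int) (st : List Int × List (List Int)) (idx : Int) : List Int × List (List Int) :=
  let pool := if idx ≠ 0 then ((PySem.List.pop? st.1 0).map Prod.snd).getD st.1 else st.1
  (pool, pvInnerA number idx pool st.2)

def find_prefixes (number : List Int) : List (List Int) :=
  ((PySem.List.pyRange 0 (number.length : Int) 1).foldl (pvStepA number) (number, ([] : List (List Int)))).2

-- ===== PORT B =====
-- one step of B's backward pass: maybe insert d into the sorted distinct-digit list
-- (the while loop counts the leading elements < d), then record takeWhile(< d)
def pvBackStep (st : List (List Int) × List Int) (d : Int) : List (List Int) × List Int :=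
  let digits := if 0 ≤ d ∧ d < 10 ∧ d ∉ st.2
    then PySem.List.insert st.2 (((st.2.takeWhile (fun x => decide (x < d))).length : Nat) : Int) d
    else st.2
  (st.1 ++ [digits.takeWhile (fun n => decide (n < d))], digits)

-- B's one-time trim: 'if picks and picks[0] and picks[0][0] == 0: picks[0] = picks[0][1:]'
def pvTrim : List (List Int) → List (List Int)
  | (n :: t) :: rest => if n = 0 then t :: rest else (n :: t) :: rest
  | picks => picks

-- one step of B's forward pass over zip(number, picks): emit prefix+[n] for each pick, grow prefix
def pvFwdStep (st : List Int × List (List Int)) (p : Int × List Int) : List Int × List (List Int) :=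
  (st.1 ++ [p.1], st.2 ++ p.2.map (fun n => st.1 ++ [n]))

def find_prefixes_alt (number : List Int) : List (List Int) :=
  ((number.zip (pvTrim (number.reverse.foldl pvBackStep ([], [])).1.reverse)).foldl
    pvFwdStep (([] : List Int), ([] : List (List Int)))).2

-- ===== PRECONDITION & SPEC =====
def Spec_find_prefixes (number : List Int) (out : List (List Int)) : Prop := out = find_prefixes_alt number
instance (number : List Int) (out : List (List Int)) : Decidable (Spec_find_prefixes number out) := by unfold Spec_find_prefixes; infer_instance

-- ===== CLAIM (what is proved, stated in full; the proofs are below) =====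
def Claim_equal_find_prefixes : Prop := ∀ (number : List Int), Dom_find_prefixes number → Spec_find_prefixes number (find_prefixes number)

-- ===== LEMMAS AND PROOFS =====

-- the block of results contributed at position idx (proof-only reference function)
def pvChunk (number : List Int) (idx : Nat) : List (List Int) :=
  ((PySem.List.pyRange 0 10 1).filter
    (fun n => decide (n < PySem.List.pyGetD number (idx : Int) 0 ∧ n ∈ number.drop idx ∧
      (((idx : Int) = 0 ∧ n ≠ 0) ∨ (idx : Int) ≠ 0)))).map
    (fun n => number.take idx ++ [n])

def pvSpecFrom (number : List Int) (k : Nat) : List (List Int) :=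
  if _h : k < number.length then pvChunk number k ++ pvSpecFrom number (k + 1) else []
termination_by number.length - k

-- generic accumulator shape: append-if over a Prop test
theorem pv_foldl_append_ite {α β : Type} (l : List α) (P : α → Prop) [DecidablePred P]
    (f : α → β) (acc : List β) :
    l.foldl (fun res x => if P x then res ++ [f x] else res) acc
      = acc ++ (l.filter (fun x => decide (P x))).map f := by
  induction l generalizing acc with
  | nil => simp
  | cons x xs ih =>
    by_cases h : P x <;> simp [List.foldl_cons, h, ih]

-- A's inner loop appends exactly pvChunk when pool is the current suffix
theorem pvInnerA_eq (number : List Int) (idx : Nat) (res : List (List Int)) :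
    pvInnerA number (idx : Int) (number.drop idx) res = res ++ pvChunk number idx := by
  have h := pv_foldl_append_ite (PySem.List.pyRange 0 10 1)
    (fun n => n < PySem.List.pyGetD number (idx : Int) 0 ∧ n ∈ number.drop idx ∧
      (((idx : Int) = 0 ∧ n ≠ 0) ∨ (idx : Int) ≠ 0))
    (fun n => PySem.List.slice number none (some (idx : Int)) ++ [n]) res
  unfold pvInnerA pvChunk
  rw [h]
  simp only [PySem.List.slice_to_natCast]

-- unfolding equations for pvSpecFrom
theorem pvSpecFrom_pos (number : List Int) (k : Nat) (h : k < number.length) :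
    pvSpecFrom number k = pvChunk number k ++ pvSpecFrom number (k + 1) := by
  rw [pvSpecFrom, dif_pos h]

theorem pvSpecFrom_neg (number : List Int) (k : Nat) (h : ¬ k < number.length) :
    pvSpecFrom number k = [] := by
  rw [pvSpecFrom, dif_neg h]

-- one iteration of A's outer loop at index k ≥ 1
theorem pvStepA_eq (number : List Int) (k : Nat) (hk : 1 ≤ k) (hlt : k < number.length)
    (res : List (List Int)) :
    pvStepA number (number.drop (k - 1), res) (k : Int)
      = (number.drop k, res ++ pvChunk number k) := by
  have hk1 : k - 1 < number.length := by omega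
  have hcons : number.drop (k - 1) = number[k - 1] :: number.drop k := by
    have h2 : k - 1 + 1 = k := by omega
    rw [List.drop_eq_getElem_cons hk1, h2]
  have hne : (k : Int) ≠ 0 := by
    simp only [ne_eq, Nat.cast_eq_zero]
    omega
  unfold pvStepA
  simp only [hcons, if_pos hne, PySem.List.pop?_zero_cons, Option.map_some, Option.getD_some]
  rw [pvInnerA_eq number k res]

-- A's outer loop from index k ≥ 1 (fueled induction)
theorem pvA_outer_fuel (number : List Int) (fuel : Nat) : ∀ (k : Nat),
    number.length ≤ k + fuel → 1 ≤ k → ∀ res : List (List Int),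
    ((PySem.List.pyRange (k : Int) (number.length : Int) 1).foldl (pvStepA number)
      (number.drop (k - 1), res)).2 = res ++ pvSpecFrom number k := by
  induction fuel with
  | zero =>
    intro k hf hk res
    have hle : (number.length : Int) ≤ (k : Int) := by exact_mod_cast hf
    rw [PySem.List.pyRange_one_eq_nil hle, List.foldl_nil,
        pvSpecFrom_neg number k (by omega), List.append_nil]
  | succ fuel ih =>
    intro k hf hk res
    by_cases hlt : k < number.length
    · rw [PySem.List.pyRange_one_cons (by exact_mod_cast hlt), List.foldl_cons,
          pvStepA_eq number k hk hlt res]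
      have hc : ((k : Int) + 1) = ((k + 1 : Nat) : Int) := by push_cast; ring
      have hd : number.drop k = number.drop ((k + 1) - 1) := by congr 1
      rw [hc, hd, ih (k + 1) (by omega) (by omega) (res ++ pvChunk number k),
          pvSpecFrom_pos number k hlt, List.append_assoc]
    · have hle : (number.length : Int) ≤ (k : Int) := by exact_mod_cast by omega
      rw [PySem.List.pyRange_one_eq_nil hle, List.foldl_nil,
          pvSpecFrom_neg number k hlt, List.append_nil]

theorem pvA_eq_spec (number : List Int) : find_prefixes number = pvSpecFrom number 0 := by
  unfold find_prefixes
  by_cases h0 : number.length = 0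
  · rw [show ((number.length : Int)) = 0 from by exact_mod_cast h0,
        PySem.List.pyRange_one_eq_nil le_rfl, List.foldl_nil,
        pvSpecFrom_neg number 0 (by omega)]
  · have hlen : 0 < number.length := by omega
    rw [PySem.List.pyRange_one_cons (by exact_mod_cast hlen), List.foldl_cons]
    have hstep0 : pvStepA number (number, []) 0 = (number, pvChunk number 0) := by
      unfold pvStepA
      simp only [ne_eq, not_true_eq_false, if_false]
      have hin := pvInnerA_eq number 0 []
      simp only [Nat.cast_zero, List.drop_zero, List.nil_append] at hin
      rw [hin]
    rw [hstep0]
    have h1 := pvA_outer_fuel number number.length 1 (by omega) le_rfl (pvChunk number 0)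
    simp only [Nat.cast_one, List.drop_zero, Nat.sub_self] at h1
    rw [zero_add, h1, pvSpecFrom_pos number 0 hlen]

-- ===== B-side reference objects =====

-- the sorted distinct digits 0..9 occurring in l
def pvDig (l : List Int) : List Int :=
  (PySem.List.pyRange 0 10 1).filter (fun n => decide (n ∈ l))

-- the per-position pick lists B's backward pass computes (filter form)
def pvPicks : List Int → List (List Int)
  | [] => []
  | d :: rest => (pvDig (d :: rest)).filter (fun n => decide (n < d)) :: pvPicks rest

theorem pv_mem_pvDig (l : List Int) (n : Int) :
    n ∈ pvDig l ↔ 0 ≤ n ∧ n < 10 ∧ n ∈ l := by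
  simp [pvDig, List.mem_filter, PySem.List.mem_pyRange_one, and_assoc]

theorem pv_pairwise_pvDig (l : List Int) : (pvDig l).Pairwise (· < ·) :=
  (PySem.List.pairwise_lt_pyRange_one 0 10).filter _

theorem pv_nodup_of_pairwise_lt (L : List Int) (h : L.Pairwise (· < ·)) : L.Nodup :=
  h.imp (fun hlt => ne_of_lt hlt)

-- on a strictly sorted list, the port's takeWhile(< d) is a filter
theorem pv_takeWhile_eq_filter (L : List Int) (d : Int) (hp : L.Pairwise (· < ·)) :
    L.takeWhile (fun n => decide (n < d)) = L.filter (fun n => decide (n < d)) := by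
  induction L with
  | nil => rfl
  | cons a t ih =>
    rcases List.pairwise_cons.mp hp with ⟨ha, ht⟩
    by_cases h : a < d
    · rw [List.takeWhile_cons_of_pos (by simpa using h),
          List.filter_cons_of_pos (by simpa using h), ih ht]
    · have hfil : t.filter (fun n => decide (n < d)) = [] := by
        rw [List.filter_eq_nil_iff]
        intro x hx
        have := ha x hx
        simp only [decide_eq_true_eq]
        omega
      rw [List.takeWhile_cons_of_neg (by simpa using h),
          List.filter_cons_of_neg (by simpa using h), hfil]

-- two strictly sorted integer lists with the same members are equal
theorem pv_eq_of_sorted_mem (L M : List Int) (hL : L.Pairwise (· < ·))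
    (hM : M.Pairwise (· < ·)) (hmem : ∀ n, n ∈ L ↔ n ∈ M) : L = M := by
  have hperm : L.Perm M :=
    (List.perm_ext_iff_of_nodup (pv_nodup_of_pairwise_lt L hL)
      (pv_nodup_of_pairwise_lt M hM)).mpr hmem
  exact PySem.List.eq_of_perm_of_pairwise_le_of_injective (fun x => x)
    (fun _ _ h => h) hperm (hL.imp le_of_lt) (hM.imp le_of_lt)

-- elements surviving dropWhile(< d) in a strictly sorted list are ≥ d
theorem pv_dropWhile_ge (L : List Int) (d : Int) (hp : L.Pairwise (· < ·)) :
    ∀ x ∈ L.dropWhile (fun n => decide (n < d)), d ≤ x := by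
  induction L with
  | nil => intro x hx; simp [List.dropWhile] at hx
  | cons a t ih =>
    rcases List.pairwise_cons.mp hp with ⟨ha, ht⟩
    by_cases h : a < d
    · simpa only [List.dropWhile_cons, decide_eq_true h] using ih ht
    · intro x hx
      rw [List.dropWhile_cons, if_neg (by simp [h])] at hx
      rcases List.mem_cons.mp hx with rfl | hx
      · omega
      · have := ha x hx; omega

theorem pv_take_len_takeWhile {α : Type} (L : List α) (p : α → Bool) :
    L.take (L.takeWhile p).length = L.takeWhile p := by
  induction L with
  | nil => rfl
  | cons a t ih =>
    by_cases h : p a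
    · rw [List.takeWhile_cons_of_pos h, List.length_cons, List.take_succ_cons, ih]
    · rw [List.takeWhile_cons_of_neg h, List.length_nil, List.take_zero]

theorem pv_drop_len_takeWhile {α : Type} (L : List α) (p : α → Bool) :
    L.drop (L.takeWhile p).length = L.dropWhile p := by
  induction L with
  | nil => rfl
  | cons a t ih =>
    by_cases h : p a
    · rw [List.takeWhile_cons_of_pos h, List.length_cons, List.drop_succ_cons, ih,
          List.dropWhile_cons_of_pos h]
    · rw [List.takeWhile_cons_of_neg h, List.length_nil, List.drop_zero,
          List.dropWhile_cons_of_neg h]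

-- the inserted list is strictly sorted with membership {d} ∪ L
theorem pv_insert_sorted (L : List Int) (d : Int) :
    PySem.List.insert L (((L.takeWhile (fun x => decide (x < d))).length : Nat) : Int) d
      = L.takeWhile (fun x => decide (x < d)) ++ d :: L.dropWhile (fun x => decide (x < d)) := by
  rw [PySem.List.insert_natCast L _ d ((List.takeWhile_sublist _).length_le),
      pv_take_len_takeWhile, pv_drop_len_takeWhile]

theorem pv_insert_props (L : List Int) (d : Int) (hp : L.Pairwise (· < ·)) (hnm : d ∉ L) :
    (L.takeWhile (fun x => decide (x < d)) ++ d :: L.dropWhile (fun x => decide (x < d))).Pairwise (· < ·)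
    ∧ ∀ n, (n ∈ L.takeWhile (fun x => decide (x < d)) ++ d :: L.dropWhile (fun x => decide (x < d)))
        ↔ (n = d ∨ n ∈ L) := by
  have hsplit : L.takeWhile (fun x => decide (x < d)) ++ L.dropWhile (fun x => decide (x < d)) = L :=
    List.takeWhile_append_dropWhile
  have htlt : ∀ x ∈ L.takeWhile (fun x => decide (x < d)), x < d := by
    intro x hx
    have := List.mem_takeWhile_imp hx
    simpa using this
  have hdge : ∀ x ∈ L.dropWhile (fun x => decide (x < d)), d < x := by
    intro x hx
    have hge := pv_dropWhile_ge L d hp x hx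
    have hxL : x ∈ L := by
      rw [← hsplit]; exact List.mem_append_right _ hx
    have : x ≠ d := fun h => hnm (h ▸ hxL)
    omega
  have hpw : (L.takeWhile (fun x => decide (x < d)) ++ L.dropWhile (fun x => decide (x < d))).Pairwise (· < ·) := by
    rw [hsplit]; exact hp
  rcases List.pairwise_append.mp hpw with ⟨hp1, hp2, hcross⟩
  constructor
  · rw [List.pairwise_append]
    refine ⟨hp1, ?_, ?_⟩
    · rw [List.pairwise_cons]
      exact ⟨hdge, hp2⟩
    · intro x hx y hy
      rcases List.mem_cons.mp hy with rfl | hy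
      · exact htlt x hx
      · exact hcross x hx y hy
  · intro n
    constructor
    · intro hn
      rcases List.mem_append.mp hn with h | h
      · right; rw [← hsplit]; exact List.mem_append_left _ h
      · rcases List.mem_cons.mp h with rfl | h
        · left; rfl
        · right; rw [← hsplit]; exact List.mem_append_right _ h
    · intro hn
      rcases hn with rfl | hn
      · exact List.mem_append_right _ (List.mem_cons_self)
      · rw [← hsplit] at hn
        rcases List.mem_append.mp hn with h | h
        · exact List.mem_append_left _ h
        · exact List.mem_append_right _ (List.mem_cons_of_mem _ h)

-- the backward step updates the digit set correctly
theorem pv_digits_step (d : Int) (rest : List Int) :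
    (if 0 ≤ d ∧ d < 10 ∧ d ∉ pvDig rest
      then PySem.List.insert (pvDig rest)
        ((((pvDig rest).takeWhile (fun x => decide (x < d))).length : Nat) : Int) d
      else pvDig rest) = pvDig (d :: rest) := by
  by_cases hc : 0 ≤ d ∧ d < 10 ∧ d ∉ pvDig rest
  · rw [if_pos hc]
    rcases hc with ⟨h0, h10, hnm⟩
    rw [pv_insert_sorted (pvDig rest) d]
    obtain ⟨hpw, hmem⟩ := pv_insert_props (pvDig rest) d (pv_pairwise_pvDig rest) hnm
    apply pv_eq_of_sorted_mem _ _ hpw (pv_pairwise_pvDig (d :: rest))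
    intro n
    rw [hmem n, pv_mem_pvDig, pv_mem_pvDig, List.mem_cons]
    constructor
    · rintro (rfl | ⟨hn0, hn10, hnr⟩)
      · exact ⟨h0, h10, Or.inl rfl⟩
      · exact ⟨hn0, hn10, Or.inr hnr⟩
    · rintro ⟨hn0, hn10, rfl | hnr⟩
      · exact Or.inl rfl
      · exact Or.inr ⟨hn0, hn10, hnr⟩
  · rw [if_neg hc]
    apply pv_eq_of_sorted_mem _ _ (pv_pairwise_pvDig rest) (pv_pairwise_pvDig (d :: rest))
    intro n
    rw [pv_mem_pvDig, pv_mem_pvDig, List.mem_cons]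
    constructor
    · rintro ⟨hn0, hn10, hnr⟩
      exact ⟨hn0, hn10, Or.inr hnr⟩
    · rintro ⟨hn0, hn10, rfl | hnr⟩
      · -- d itself is in 0..10 here, so the condition can only fail because d ∈ pvDig rest
        have hd : n ∈ pvDig rest := by
          by_contra hnm
          exact hc ⟨hn0, hn10, hnm⟩
        exact ⟨hn0, hn10, ((pv_mem_pvDig rest n).mp hd).2.2⟩
      · exact ⟨hn0, hn10, hnr⟩

-- the whole backward pass
theorem pvBack (l : List Int) :
    l.reverse.foldl pvBackStep ([], []) = ((pvPicks l).reverse, pvDig l) := by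
  rw [List.foldl_reverse]
  induction l with
  | nil =>
    simp only [List.foldr_nil, pvPicks, List.reverse_nil]
    have : pvDig [] = [] := by
      rw [pvDig, List.filter_eq_nil_iff]; intro x _; simp
    rw [this]
  | cons d rest ih =>
    rw [List.foldr_cons, ih]
    show pvBackStep ((pvPicks rest).reverse, pvDig rest) d = _
    unfold pvBackStep
    simp only []
    rw [pv_digits_step d rest,
        pv_takeWhile_eq_filter (pvDig (d :: rest)) d (pv_pairwise_pvDig (d :: rest))]
    show ((pvPicks rest).reverse ++ [(pvDig (d :: rest)).filter (fun n => decide (n < d))], _) = _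
    rw [show pvPicks (d :: rest)
          = (pvDig (d :: rest)).filter (fun n => decide (n < d)) :: pvPicks rest from rfl,
        List.reverse_cons]

-- pvChunk in terms of pvDig
theorem pv_chunk_eq (number : List Int) (idx : Nat) :
    pvChunk number idx
      = (((pvDig (number.drop idx)).filter
            (fun n => decide (n < PySem.List.pyGetD number (idx : Int) 0))).filter
          (fun n => decide ((idx : Int) = 0 → n ≠ 0))).map
        (fun n => number.take idx ++ [n]) := by
  unfold pvChunk pvDig
  rw [List.filter_filter, List.filter_filter]
  congr 1
  apply List.filter_congr
  intro n hn
  rw [PySem.List.mem_pyRange_one] at hn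
  rw [Bool.eq_iff_iff]
  simp only [Bool.and_eq_true, decide_eq_true_eq]
  by_cases h0 : (idx : Int) = 0 <;> simp [h0] <;> tauto

-- trimming the leading zero of a strictly sorted nonnegative list = filtering out 0
theorem pv_trim_head (n : Int) (t : List Int) (hp : (n :: t).Pairwise (· < ·))
    (hnn : ∀ x ∈ n :: t, 0 ≤ x) :
    (if n = 0 then t else n :: t)
      = (n :: t).filter (fun m => decide ((0 : Int) = 0 → m ≠ 0)) := by
  rcases List.pairwise_cons.mp hp with ⟨hn, _⟩
  by_cases h0 : n = 0
  · subst h0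
    rw [if_pos rfl, List.filter_cons_of_neg (by simp), Eq.comm, List.filter_eq_self]
    intro x hx
    have := hn x hx
    simp only [decide_eq_true_eq]
    omega
  · have hnpos : 0 < n := by
      have := hnn n List.mem_cons_self; omega
    rw [if_neg h0, List.filter_cons_of_pos (by simp [h0]), Eq.comm]
    have : t.filter (fun m => decide ((0 : Int) = 0 → m ≠ 0)) = t := by
      rw [List.filter_eq_self]
      intro x hx
      have := hn x hx
      simp only [decide_eq_true_eq]
      omega
    rw [this]

-- the forward pass from any position ≥ 1
theorem pvFwd (number : List Int) : ∀ (suf pre : List Int) (res : List (List Int)),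
    number = pre ++ suf → pre ≠ [] →
    ((suf.zip (pvPicks suf)).foldl pvFwdStep (pre, res)).2 = res ++ pvSpecFrom number pre.length := by
  intro suf
  induction suf with
  | nil =>
    intro pre res hnum _
    rw [show pvPicks [] = [] from rfl]
    simp only [List.zip_nil_right, List.foldl_nil]
    rw [pvSpecFrom_neg number pre.length (by subst hnum; simp), List.append_nil]
  | cons d suf' ih =>
    intro pre res hnum hne
    have hlt : pre.length < number.length := by subst hnum; simp
    have htake : number.take pre.length = pre := by subst hnum; simp
    have hdrop : number.drop pre.length = d :: suf' := by subst hnum; simp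
    have hget : PySem.List.pyGetD number ((pre.length : Nat) : Int) 0 = d := by
      rw [PySem.List.pyGetD_natCast, List.getD_eq_getElem?_getD]
      subst hnum
      rw [List.getElem?_append_right le_rfl]
      simp
    have hidx0 : (pre.length : Int) ≠ 0 := by
      simp only [ne_eq, Nat.cast_eq_zero, List.length_eq_zero_iff]
      exact hne
    have hchunk : pvChunk number pre.length
        = ((pvDig (d :: suf')).filter (fun n => decide (n < d))).map (fun n => pre ++ [n]) := by
      rw [pv_chunk_eq number pre.length, hdrop, hget, htake]
      congr 1
      rw [List.filter_eq_self]
      intro x _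
      simp only [decide_eq_true_eq]
      intro h; exact absurd h hidx0
    rw [show pvPicks (d :: suf')
          = (pvDig (d :: suf')).filter (fun n => decide (n < d)) :: pvPicks suf' from rfl,
        List.zip_cons_cons, List.foldl_cons]
    show ((suf'.zip (pvPicks suf')).foldl pvFwdStep
        (pre ++ [d], res ++ ((pvDig (d :: suf')).filter (fun n => decide (n < d))).map
          (fun n => pre ++ [n]))).2 = _
    rw [ih (pre ++ [d]) _ (by rw [hnum]; simp) (by simp)]
    rw [← hchunk, pvSpecFrom_pos number pre.length hlt, List.append_assoc]
    simp

theorem pvB_eq_spec (number : List Int) : find_prefixes_alt number = pvSpecFrom number 0 := by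
  unfold find_prefixes_alt
  rw [pvBack number]
  simp only [List.reverse_reverse]
  cases number with
  | nil =>
    simp only [pvPicks, pvTrim, List.zip_nil_left, List.foldl_nil]
    rw [pvSpecFrom_neg [] 0 (by simp)]
  | cons d rest =>
    have hlen : 0 < (d :: rest).length := by simp
    have hpick0 : pvPicks (d :: rest)
        = (pvDig (d :: rest)).filter (fun n => decide (n < d)) :: pvPicks rest := rfl
    set L := (pvDig (d :: rest)).filter (fun n => decide (n < d)) with hL
    have hpL : L.Pairwise (· < ·) := (pv_pairwise_pvDig (d :: rest)).filter _
    have hnnL : ∀ x ∈ L, 0 ≤ x := by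
      intro x hx
      have hx' := List.mem_of_mem_filter hx
      exact ((pv_mem_pvDig _ x).mp hx').1
    have htrim : pvTrim (pvPicks (d :: rest))
        = (L.filter (fun n => decide ((0 : Int) = 0 → n ≠ 0))) :: pvPicks rest := by
      rw [hpick0]
      cases hLc : L with
      | nil => rfl
      | cons n t =>
        have h := pv_trim_head n t (hLc ▸ hpL) (hLc ▸ hnnL)
        show (if n = 0 then t :: pvPicks rest else (n :: t) :: pvPicks rest) = _
        rw [← h]
        by_cases h0 : n = 0 <;> simp [h0]
    rw [htrim, List.zip_cons_cons, List.foldl_cons]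
    have hchunk0 : pvChunk (d :: rest) 0
        = (L.filter (fun n => decide ((0 : Int) = 0 → n ≠ 0))).map (fun n => [] ++ [n]) := by
      rw [pv_chunk_eq (d :: rest) 0]
      simp only [Nat.cast_zero, List.drop_zero, List.take_zero, hL]
      have hg : PySem.List.pyGetD (d :: rest) 0 0 = d := by
        simp [PySem.List.pyGetD, PySem.List.pyGet?, PySem.List.pyIdx?]
      rw [hg]
    show (((rest.zip (pvPicks rest)).foldl pvFwdStep
        ([] ++ [d], [] ++ (L.filter (fun n => decide ((0 : Int) = 0 → n ≠ 0))).map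
          (fun n => [] ++ [n]))).2) = _
    rw [pvFwd (d :: rest) rest ([] ++ [d]) _ (by simp) (by simp)]
    rw [← hchunk0, pvSpecFrom_pos (d :: rest) 0 hlen]
    simp

-- ===== VERDICT (by name: the statement is the Claim_ definition above) =====
theorem find_prefixes_spec : Claim_equal_find_prefixes := by
  intro number _
  unfold Spec_find_prefixes
  rw [pvA_eq_spec, pvB_eq_spec]
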